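-- pv_equiv track=rewrite | github.com/12fn/MDMhackathon-repos | 26-opengate-data-gov-rag/src/app.py | _md_to_safe_html
-- ===== SOURCE A (Python) =====
-- def _md_to_safe_html(text: str) -> str:
--     # very light: only **bold** + newlines
--     out = []
--     for line in text.split("\n"):
--         line = line.strip()
--         # bold
--         while "**" in line:
--             line = line.replace("**", "<strong>", 1)
--             line = line.replace("**", "</strong>", 1)
--         out.append(line)
--     return "<br>".join(out)
-- ===== SOURCE B (Python) =====
-- def _md_to_safe_html(text: str) -> str:
--     # single split-and-interleave pass per line instead of A's repeated replace scans
--     lines = []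
--     for line in text.split("\n"):
--         parts = line.strip().split("**")
--         html = parts[0]
--         for i, part in enumerate(parts[1:]):
--             html += ("<strong>" if i % 2 == 0 else "</strong>") + part
--         lines.append(html)
--     return "<br>".join(lines)
-- ===== Notes on version B (the rewrite author's own statement) =====
-- stated objective: simpler
-- what changed: Per line, replaces the while-loop that repeatedly rescans the string with replace('**',...,1) by a single split('**') followed by one pass that interleaves alternating <strong>/</strong> tags between the parts.
import Mathlib
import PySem

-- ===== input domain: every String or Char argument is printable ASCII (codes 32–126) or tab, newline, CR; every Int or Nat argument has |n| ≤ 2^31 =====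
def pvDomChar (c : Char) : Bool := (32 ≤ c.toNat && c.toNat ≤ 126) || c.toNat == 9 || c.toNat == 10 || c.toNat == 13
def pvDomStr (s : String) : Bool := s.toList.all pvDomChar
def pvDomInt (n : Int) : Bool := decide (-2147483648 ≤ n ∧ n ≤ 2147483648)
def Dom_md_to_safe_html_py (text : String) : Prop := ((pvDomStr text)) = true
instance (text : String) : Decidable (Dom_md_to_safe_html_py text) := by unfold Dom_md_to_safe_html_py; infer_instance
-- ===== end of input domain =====

-- B replaces A's repeated replace-first while-loop by one split on "**" plus a tag-interleaving
-- rebuild per line (objective: simpler single-pass rebuild, same result).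

-- shared string literals
def pvStrong : List Char := "<strong>".toList
def pvStrongC : List Char := "</strong>".toList

-- ===== PORT A =====
-- line.replace("**", new, 1): PySem has no count-limited replace, so this is a hand port,
-- exact for the fixed pattern "**": scan left to right, rewrite the first adjacent pair.
def pvReplaceStar1 : List Char → List Char → List Char
  | [], _ => []
  | [c], _ => [c]
  | c1 :: c2 :: rest, new =>
    if c1 = '*' ∧ c2 = '*' then new ++ rest
    else c1 :: pvReplaceStar1 (c2 :: rest) new

-- the 'while "**" in line' loop; the fuel only makes the recursion structural
-- (each iteration removes at least two '*', so fuel = length suffices).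
def pvBoldLoopA : Nat → List Char → List Char
  | 0, cs => cs
  | fuel + 1, cs =>
    if PySem.Chars.isIn ['*', '*'] cs then
      pvBoldLoopA fuel (pvReplaceStar1 (pvReplaceStar1 cs pvStrong) pvStrongC)
    else cs

def pvLineA (line : List Char) : List Char :=
  let l := PySem.Chars.strip line
  pvBoldLoopA l.length l

def md_to_safe_html_py (text : String) : String :=
  String.ofList (PySem.Chars.join "<br>".toList
    ((PySem.Chars.splitOn text.toList ['\n']).map pvLineA))

-- ===== PORT B =====
-- line.split("**"): hand port of str.split for this fixed two-char separator
-- (leftmost non-overlapping scan, exact).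
def pvSplitStars : List Char → List (List Char)
  | [] => [[]]
  | [c] => [[c]]
  | c1 :: c2 :: rest =>
    if c1 = '*' ∧ c2 = '*' then [] :: pvSplitStars rest
    else
      match pvSplitStars (c2 :: rest) with
      | p :: ps => (c1 :: p) :: ps
      | [] => [[c1]]    -- unreachable: pvSplitStars never returns []

def pvLineB (line : List Char) : List Char :=
  match pvSplitStars (PySem.Chars.strip line) with
  | [] => []            -- unreachable: pvSplitStars never returns []
  | p :: ps =>
    (PySem.List.enumerate ps 0).foldl
      (fun acc ip => acc ++ (if PySem.Int.mod ip.1 2 == 0 then pvStrong else pvStrongC) ++ ip.2) p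

def md_to_safe_html_py_alt (text : String) : String :=
  String.ofList (PySem.Chars.join "<br>".toList
    ((PySem.Chars.splitOn text.toList ['\n']).map pvLineB))

-- ===== PRECONDITION & SPEC =====
def Spec_md_to_safe_html_py (text : String) (out : String) : Prop := out = md_to_safe_html_py_alt text
instance (text : String) (out : String) : Decidable (Spec_md_to_safe_html_py text out) := by unfold Spec_md_to_safe_html_py; infer_instance

-- ===== CLAIM (what is proved, stated in full; the proofs are below) =====
def Claim_equal_md_to_safe_html_py : Prop := ∀ (text : String), Dom_md_to_safe_html_py text → Spec_md_to_safe_html_py text (md_to_safe_html_py text)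

-- ===== LEMMAS AND PROOFS =====

-- "cs has no adjacent '*','*' pair" (= no occurrence of "**")
def pvNoPair : List Char → Bool
  | c1 :: c2 :: rest => !(c1 = '*' && c2 = '*') && pvNoPair (c2 :: rest)
  | _ => true

-- "cs does not end with '*'"
def pvLastNe (cs : List Char) : Prop := cs.getLast? ≠ some '*'

-- the tag-interleaved tail of the rebuilt line, starting at index s
def pvTail : Int → List (List Char) → List Char
  | _, [] => []
  | s, q :: qs => (if PySem.Int.mod s 2 == 0 then pvStrong else pvStrongC) ++ q ++ pvTail (s + 1) qs

-- the common value both sides compute for one stripped line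
def pvSpec (cs : List Char) : List Char :=
  match pvSplitStars cs with
  | [] => []
  | p :: ps => p ++ pvTail 0 ps

lemma pvNoPair_cons₂ (c d : Char) (t : List Char) :
    pvNoPair (c :: d :: t) = true ↔ ¬(c = '*' ∧ d = '*') ∧ pvNoPair (d :: t) = true := by
  simp [pvNoPair]; tauto

lemma pvNoPair_cons₂_false (c d : Char) (t : List Char) :
    pvNoPair (c :: d :: t) = false ↔ (c = '*' ∧ d = '*') ∨ pvNoPair (d :: t) = false := by
  simp [pvNoPair]; tauto

lemma pvLastNe_cons_cons (c d : Char) (t : List Char) :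
    pvLastNe (c :: d :: t) ↔ pvLastNe (d :: t) := by
  simp [pvLastNe, List.getLast?_cons_cons]

lemma pvPair_infix_iff (cs : List Char) : (['*', '*'] <:+: cs) ↔ pvNoPair cs = false := by
  induction cs with
  | nil => simp [pvNoPair]
  | cons c t ih =>
    cases t with
    | nil =>
      constructor
      · intro h; have h2 := h.length_le; simp at h2
      · intro h; simp [pvNoPair] at h
    | cons d t' =>
      rw [List.infix_cons_iff, pvNoPair_cons₂_false]
      constructor
      · rintro (hp | hi)
        · rcases List.cons_prefix_cons.mp hp with ⟨h1, hp2⟩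
          rcases List.cons_prefix_cons.mp hp2 with ⟨h2, -⟩
          exact Or.inl ⟨h1.symm, h2.symm⟩
        · exact Or.inr (ih.mp hi)
      · rintro (⟨h1, h2⟩ | h)
        · exact Or.inl (List.cons_prefix_cons.mpr ⟨h1.symm,
            List.cons_prefix_cons.mpr ⟨h2.symm, List.nil_prefix⟩⟩)
        · exact Or.inr (ih.mpr h)

lemma pvIsIn_eq (cs : List Char) : PySem.Chars.isIn ['*', '*'] cs = !pvNoPair cs := by
  cases hn : pvNoPair cs with
  | true =>
    have hni : ¬ (['*', '*'] <:+: cs) := fun h => by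
      rw [(pvPair_infix_iff cs).mp h] at hn; exact Bool.false_ne_true hn
    simp [(PySem.Chars.isIn_eq_false_iff _ _).mpr hni]
  | false =>
    simp [(PySem.Chars.isIn_iff_infix _ _).mpr ((pvPair_infix_iff cs).mpr hn)]

lemma pvReplace_append (pfx cs new : List Char) (h1 : pvNoPair pfx = true) (h2 : pvLastNe pfx) :
    pvReplaceStar1 (pfx ++ cs) new = pfx ++ pvReplaceStar1 cs new := by
  induction pfx with
  | nil => rfl
  | cons c t ih =>
    cases t with
    | nil =>
      have hc : c ≠ '*' := by simpa [pvLastNe] using h2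
      cases cs with
      | nil => simp [pvReplaceStar1]
      | cons d ds => simp [pvReplaceStar1, hc]
    | cons d t' =>
      rcases (pvNoPair_cons₂ c d t').mp h1 with ⟨hpair, hnp⟩
      have hrec := ih hnp ((pvLastNe_cons_cons c d t').mp h2)
      rw [List.cons_append] at hrec
      rw [List.cons_append, List.cons_append, pvReplaceStar1, if_neg hpair, hrec]
      simp

lemma pvNoPair_append (pfx cs : List Char) (h1 : pvNoPair pfx = true) (h2 : pvLastNe pfx) :
    pvNoPair (pfx ++ cs) = pvNoPair cs := by
  induction pfx with
  | nil => rfl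
  | cons c t ih =>
    cases t with
    | nil =>
      have hc : c ≠ '*' := by simpa [pvLastNe] using h2
      cases cs with
      | nil => simp [pvNoPair]
      | cons d ds => simp [pvNoPair, hc]
    | cons d t' =>
      rcases (pvNoPair_cons₂ c d t').mp h1 with ⟨hpair, hnp⟩
      have hrec := ih hnp ((pvLastNe_cons_cons c d t').mp h2)
      rw [List.cons_append] at hrec
      have hb : (!(decide (c = '*') && decide (d = '*'))) = true := by
        simp only [Bool.not_eq_eq_eq_not, Bool.not_true, Bool.and_eq_false_iff,
          decide_eq_false_iff_not]
        tauto
      rw [List.cons_append, List.cons_append]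
      show (!(decide (c = '*') && decide (d = '*')) && pvNoPair (d :: (t' ++ cs))) = pvNoPair cs
      rw [hb, Bool.true_and, hrec]

lemma pvReplace_noop (cs new : List Char) (h : pvNoPair cs = true) :
    pvReplaceStar1 cs new = cs := by
  induction cs with
  | nil => rfl
  | cons c t ih =>
    cases t with
    | nil => rfl
    | cons d t' =>
      rcases (pvNoPair_cons₂ c d t').mp h with ⟨hpair, hnp⟩
      rw [pvReplaceStar1, if_neg hpair, ih hnp]

lemma pvReplace_pair (rest new : List Char) :
    pvReplaceStar1 ('*' :: '*' :: rest) new = new ++ rest := by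
  simp [pvReplaceStar1]

lemma pvLoop_noop (cs : List Char) (h : pvNoPair cs = true) (fuel : Nat) :
    pvBoldLoopA fuel cs = cs := by
  cases fuel with
  | zero => rfl
  | succ f => rw [pvBoldLoopA, pvIsIn_eq, h]; simp

lemma pvLoop_append (pfx : List Char) (h1 : pvNoPair pfx = true) (h2 : pvLastNe pfx)
    (fuel : Nat) : ∀ cs, pvBoldLoopA fuel (pfx ++ cs) = pfx ++ pvBoldLoopA fuel cs := by
  induction fuel with
  | zero => intro cs; rfl
  | succ f ih =>
    intro cs
    rw [pvBoldLoopA, pvBoldLoopA, pvIsIn_eq, pvIsIn_eq, pvNoPair_append pfx cs h1 h2]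
    cases hn : pvNoPair cs with
    | true => simp
    | false =>
      simp only [Bool.not_false, if_true]
      rw [pvReplace_append pfx cs pvStrong h1 h2, pvReplace_append pfx _ pvStrongC h1 h2, ih]

lemma pvDec (cs : List Char) (h : pvNoPair cs = false) :
    ∃ p rest, cs = p ++ '*' :: '*' :: rest ∧ pvNoPair p = true ∧ pvLastNe p := by
  induction cs with
  | nil => simp [pvNoPair] at h
  | cons c t ih =>
    cases t with
    | nil => simp [pvNoPair] at h
    | cons d t' =>
      by_cases hcd : c = '*' ∧ d = '*'
      · exact ⟨[], t', by simp [hcd.1, hcd.2], rfl, by simp [pvLastNe]⟩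
      · have ht : pvNoPair (d :: t') = false := by
          rcases (pvNoPair_cons₂_false c d t').mp h with h' | h'
          · exact absurd h' hcd
          · exact h'
        rcases ih ht with ⟨p, rest, hEq, hp, hlast⟩
        cases p with
        | nil =>
          have hd : d = '*' := by simpa using congrArg List.head? hEq
          have hc : c ≠ '*' := fun hc => hcd ⟨hc, hd⟩
          exact ⟨[c], rest, by simp [hEq], rfl, by simpa [pvLastNe] using hc⟩
        | cons e p' =>
          have hde : d = e := by simpa using congrArg List.head? hEq
          subst hde
          refine ⟨c :: d :: p', rest, by simpa using congrArg (c :: ·) hEq, ?_, ?_⟩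
          · exact (pvNoPair_cons₂ c d p').mpr ⟨hcd, hp⟩
          · rw [pvLastNe, List.getLast?_cons_cons]; exact hlast

lemma pvSplit_noop (cs : List Char) (h : pvNoPair cs = true) : pvSplitStars cs = [cs] := by
  induction cs with
  | nil => rfl
  | cons c t ih =>
    cases t with
    | nil => rfl
    | cons d t' =>
      rcases (pvNoPair_cons₂ c d t').mp h with ⟨hpair, hnp⟩
      rw [pvSplitStars, if_neg hpair, ih hnp]

lemma pvSplit_step (p rest : List Char) (h1 : pvNoPair p = true) (h2 : pvLastNe p) :
    pvSplitStars (p ++ '*' :: '*' :: rest) = p :: pvSplitStars rest := by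
  induction p with
  | nil => simp [pvSplitStars]
  | cons c t ih =>
    cases t with
    | nil =>
      have hc : c ≠ '*' := by simpa [pvLastNe] using h2
      have hbase : pvSplitStars ('*' :: '*' :: rest) = [] :: pvSplitStars rest := by
        rw [pvSplitStars, if_pos ⟨rfl, rfl⟩]
      rw [List.cons_append, List.nil_append, pvSplitStars,
        if_neg (fun h' => hc h'.1), hbase]
    | cons d t' =>
      rcases (pvNoPair_cons₂ c d t').mp h1 with ⟨hpair, hnp⟩
      have hrec := ih hnp ((pvLastNe_cons_cons c d t').mp h2)
      rw [List.cons_append] at hrec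
      rw [List.cons_append, List.cons_append, pvSplitStars, if_neg hpair, hrec]

lemma pvSplit_ne_nil (cs : List Char) : pvSplitStars cs ≠ [] := by
  match cs with
  | [] => simp [pvSplitStars]
  | [c] => simp [pvSplitStars]
  | c1 :: c2 :: rest =>
    rw [pvSplitStars]
    split
    · simp
    · cases h : pvSplitStars (c2 :: rest)
      · simp
      · simp [h]

lemma pvMod2_add2 (s : Int) : PySem.Int.mod (s + 2) 2 = PySem.Int.mod s 2 := by
  rw [PySem.Int.mod_eq_emod_of_pos (by norm_num : (0:Int) < 2),
    PySem.Int.mod_eq_emod_of_pos (by norm_num : (0:Int) < 2)]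
  omega

lemma pvTail_add2 (qs : List (List Char)) : ∀ s, pvTail (s + 2) qs = pvTail s qs := by
  induction qs with
  | nil => intro s; rfl
  | cons q qs ih =>
    intro s
    rw [pvTail, pvTail, pvMod2_add2, show s + 2 + 1 = s + 1 + 2 by ring, ih]

lemma pvTail_zero (q : List Char) (qs : List (List Char)) :
    pvTail 0 (q :: qs) = pvStrong ++ q ++ pvTail 1 qs := by
  rw [pvTail, if_pos (by decide : ((PySem.Int.mod 0 2 == 0) = true))]
  norm_num

lemma pvTail_one (q : List Char) (qs : List (List Char)) :
    pvTail 1 (q :: qs) = pvStrongC ++ q ++ pvTail 0 qs := by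
  rw [pvTail, if_neg (by decide : ¬ ((PySem.Int.mod 1 2 == 0) = true)),
    show (1 : Int) + 1 = 0 + 2 by ring, pvTail_add2]

lemma pvFoldl_tail (qs : List (List Char)) : ∀ (a : List Char) (s : Int),
    (PySem.List.enumerate qs s).foldl
      (fun acc ip => acc ++ (if PySem.Int.mod ip.1 2 == 0 then pvStrong else pvStrongC) ++ ip.2) a
      = a ++ pvTail s qs := by
  induction qs with
  | nil => intro a s; simp [PySem.List.enumerate_nil, pvTail]
  | cons q qs ih =>
    intro a s
    rw [PySem.List.enumerate_cons, List.foldl_cons, ih, pvTail]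
    by_cases h : (PySem.Int.mod s 2 == 0) = true
    · simp [h, List.append_assoc]
    · simp [h, List.append_assoc]

lemma pvLoop_spec : ∀ (fuel : Nat) (cs : List Char), cs.count '*' ≤ fuel →
    pvBoldLoopA fuel cs = pvSpec cs := by
  intro fuel
  induction fuel with
  | zero =>
    intro cs hc
    have hnp : pvNoPair cs = true := by
      by_contra h
      rcases pvDec cs (by simpa using h) with ⟨p, rest, hEq, -, -⟩
      rw [hEq] at hc; simp [List.count_append] at hc
    have hs : pvSpec cs = cs := by
      unfold pvSpec; rw [pvSplit_noop cs hnp]; simp [pvTail]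
    rw [pvBoldLoopA, hs]
  | succ f ih =>
    intro cs hc
    by_cases hnp : pvNoPair cs = true
    · have hs : pvSpec cs = cs := by
        unfold pvSpec; rw [pvSplit_noop cs hnp]; simp [pvTail]
      rw [pvLoop_noop cs hnp, hs]
    · rcases pvDec cs (by simpa using hnp) with ⟨p, rest, hEq, hp, hpl⟩
      have hnpS : pvNoPair (p ++ pvStrong) = true := by
        rw [pvNoPair_append p pvStrong hp hpl]; decide
      have hlS : pvLastNe (p ++ pvStrong) := by
        rw [pvLastNe, List.getLast?_append_of_ne_nil _ (by decide)]; decide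
      rw [pvBoldLoopA, pvIsIn_eq, show pvNoPair cs = false by simpa using hnp]
      simp only [Bool.not_false, if_true]
      rw [hEq, pvReplace_append p _ pvStrong hp hpl, pvReplace_pair,
        show p ++ (pvStrong ++ rest) = (p ++ pvStrong) ++ rest by simp,
        pvReplace_append _ rest pvStrongC hnpS hlS, pvLoop_append _ hnpS hlS]
      have hcount : p.count '*' + rest.count '*' + 2 ≤ f + 1 := by
        rw [hEq] at hc; simp [List.count_append] at hc; omega
      by_cases hr : pvNoPair rest = true
      · rw [pvReplace_noop rest pvStrongC hr, pvLoop_noop rest hr]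
        have hs : pvSpec (p ++ '*' :: '*' :: rest) = p ++ pvTail 0 [rest] := by
          unfold pvSpec
          rw [pvSplit_step p rest hp hpl, pvSplit_noop rest hr]
        rw [hs, pvTail_zero]
        simp [pvTail, List.append_assoc]
      · rcases pvDec rest (by simpa using hr) with ⟨q, rest2, hEq2, hq, hql⟩
        have hnpC : pvNoPair (q ++ pvStrongC) = true := by
          rw [pvNoPair_append q pvStrongC hq hql]; decide
        have hlC : pvLastNe (q ++ pvStrongC) := by
          rw [pvLastNe, List.getLast?_append_of_ne_nil _ (by decide)]; decide
        rw [hEq2, pvReplace_append q _ pvStrongC hq hql, pvReplace_pair,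
          show q ++ (pvStrongC ++ rest2) = (q ++ pvStrongC) ++ rest2 by simp,
          pvLoop_append _ hnpC hlC]
        have hc2 : rest2.count '*' ≤ f := by
          rw [hEq2] at hcount; simp [List.count_append] at hcount; omega
        rw [ih rest2 hc2]
        rcases List.exists_cons_of_ne_nil (pvSplit_ne_nil rest2) with ⟨r, rs, hrs⟩
        have hs2 : pvSpec rest2 = r ++ pvTail 0 rs := by
          unfold pvSpec; rw [hrs]
        have hs : pvSpec (p ++ '*' :: '*' :: (q ++ '*' :: '*' :: rest2))
            = p ++ pvTail 0 (q :: r :: rs) := by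
          unfold pvSpec
          rw [pvSplit_step p _ hp hpl, pvSplit_step q rest2 hq hql, hrs]
        rw [hs, hs2, pvTail_zero, pvTail_one]
        simp [List.append_assoc]

lemma pvLine_eq (line : List Char) : pvLineA line = pvLineB line := by
  rcases List.exists_cons_of_ne_nil (pvSplit_ne_nil (PySem.Chars.strip line)) with ⟨p, ps, hps⟩
  show pvBoldLoopA (PySem.Chars.strip line).length (PySem.Chars.strip line) = pvLineB line
  rw [pvLoop_spec _ _ List.count_le_length]
  unfold pvSpec pvLineB
  rw [hps]
  show p ++ pvTail 0 ps = (PySem.List.enumerate ps 0).foldl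
    (fun acc ip => acc ++ (if PySem.Int.mod ip.1 2 == 0 then pvStrong else pvStrongC) ++ ip.2) p
  rw [pvFoldl_tail]

-- ===== VERDICT (by name: the statement is the Claim_ definition above) =====
theorem md_to_safe_html_py_spec : Claim_equal_md_to_safe_html_py := by
  intro text _
  unfold Spec_md_to_safe_html_py md_to_safe_html_py md_to_safe_html_py_alt
  congr 1
  exact congrArg _ (List.map_congr_left (fun l _ => pvLine_eq l))
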